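-- pv_equiv track=rewrite | github.com/fpddmw/skills | eco-council-reporting/scripts/eco_council_reporting.py | build_open_questions
-- ===== SOURCE A (Python) =====
-- from typing import Any
--
-- QUESTION_RULES = (
--     ("station-grade corroboration is missing", "Can station-grade air-quality measurements be added for the same mission window?"),
--     ("modeled background fields should be cross-checked", "Can modeled air-quality fields be cross-checked with station or local observations?"),
--     ("no mission-aligned observations matched", "Should the next round expand physical coverage or narrow claim scope so observations can be matched?"),
-- )
--
-- def normalize_space(value: str) -> str:
--     return " ".join(str(value).split())
--
-- def maybe_text(value: Any) -> str:
--     if value is None: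
--         return ""
--     return normalize_space(str(value))
--
-- def unique_strings(values: list[str]) -> list[str]:
--     seen: set[str] = set()
--     result: list[str] = []
--     for value in values:
--         text = maybe_text(value)
--         if not text or text in seen:
--             continue
--         seen.add(text)
--         result.append(text)
--     return result
--
-- def gap_to_question(gap: str) -> str:
--     lowered = maybe_text(gap).lower()
--     for needle, question in QUESTION_RULES:
--         if needle in lowered:
--             return question
--     if lowered.endswith("?"):
--         return gap
--     return f"How should the next round address this gap: {maybe_text(gap)}?"
--
-- def build_open_questions(evidence_cards: list[dict[str, Any]]) -> list[str]:
--     questions: list[str] = []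
--     for card in evidence_cards:
--         items = card.get("gaps")
--         if not isinstance(items, list):
--             continue
--         for item in items:
--             questions.append(gap_to_question(maybe_text(item)))
--     return unique_strings(questions)[:5]
-- ===== SOURCE B (Python) =====
-- from typing import Any
--
-- QUESTION_RULES = (
--     ("station-grade corroboration is missing", "Can station-grade air-quality measurements be added for the same mission window?"),
--     ("modeled background fields should be cross-checked", "Can modeled air-quality fields be cross-checked with station or local observations?"),
--     ("no mission-aligned observations matched", "Should the next round expand physical coverage or narrow claim scope so observations can be matched?"),
-- )
--
-- def normalize_space(value: str) -> str:
--     return " ".join(str(value).split())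
--
-- def maybe_text(value: Any) -> str:
--     if value is None:
--         return ""
--     return normalize_space(str(value))
--
-- def gap_to_question(gap: str) -> str:
--     lowered = maybe_text(gap).lower()
--     for needle, question in QUESTION_RULES:
--         if needle in lowered:
--             return question
--     if lowered.endswith("?"):
--         return gap
--     return f"How should the next round address this gap: {maybe_text(gap)}?"
--
-- def build_open_questions(evidence_cards: list[dict[str, Any]]) -> list[str]:
--     # One fused pass: generate, dedup and cap at 5 inline, stopping early.
--     seen: set[str] = set()
--     result: list[str] = []
--     for card in evidence_cards:
--         items = card.get("gaps")
--         if not isinstance(items, list):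
--             continue
--         for item in items:
--             text = maybe_text(gap_to_question(maybe_text(item)))
--             if not text or text in seen:
--                 continue
--             seen.add(text)
--             result.append(text)
--             if len(result) == 5:
--                 return result
--     return result
-- ===== Notes on version B (the rewrite author's own statement) =====
-- stated objective: alternative
-- what changed: Fuses A's three stages (build the full questions list, then a separate unique_strings dedup pass, then a [:5] slice) into a single pass over cards and gaps that maintains the seen-set and result inline and returns early once 5 questions are collected.
import Mathlib
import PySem

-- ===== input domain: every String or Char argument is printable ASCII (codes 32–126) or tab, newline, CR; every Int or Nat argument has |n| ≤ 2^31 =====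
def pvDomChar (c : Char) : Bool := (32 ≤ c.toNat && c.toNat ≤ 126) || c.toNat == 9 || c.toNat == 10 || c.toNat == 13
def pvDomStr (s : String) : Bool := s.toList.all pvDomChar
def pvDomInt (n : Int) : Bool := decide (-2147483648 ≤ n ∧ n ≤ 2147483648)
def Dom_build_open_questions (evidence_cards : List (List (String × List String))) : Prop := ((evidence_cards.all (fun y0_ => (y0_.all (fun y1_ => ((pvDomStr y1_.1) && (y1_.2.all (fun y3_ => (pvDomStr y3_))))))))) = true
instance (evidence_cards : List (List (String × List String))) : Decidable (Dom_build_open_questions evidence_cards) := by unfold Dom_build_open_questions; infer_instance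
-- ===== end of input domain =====

-- B fuses A's build-list / unique_strings / [:5]-slice stages into one early-exiting pass (objective: alternative decomposition).

-- ===== PORT A =====
-- shared module helpers, transliterated once and used by both ports (as in the Python module)

def questionRules : List (String × String) :=
  [("station-grade corroboration is missing", "Can station-grade air-quality measurements be added for the same mission window?"),
   ("modeled background fields should be cross-checked", "Can modeled air-quality fields be cross-checked with station or local observations?"),
   ("no mission-aligned observations matched", "Should the next round expand physical coverage or narrow claim scope so observations can be matched?")]

def normalize_space (value : String) : String :=
  PySem.Str.join " " (PySem.Str.split₀ value)

-- value is typed String here, so Python's 'value is None' branch never fires and str(value) = value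
def maybe_text (value : String) : String :=
  normalize_space value

-- the 'for needle, question in QUESTION_RULES' loop with early return
def ruleLoop (rules : List (String × String)) (lowered : String) : Option String :=
  match rules with
  | [] => none
  | (needle, question) :: rest =>
    if PySem.Str.isIn needle lowered then some question else ruleLoop rest lowered

def gap_to_question (gap : String) : String :=
  let lowered := PySem.Str.lower (maybe_text gap)
  match ruleLoop questionRules lowered with
  | some question => question
  | none =>
    if PySem.Str.endswith lowered "?" then gap
    else PySem.Str.join "" ["How should the next round address this gap: ", maybe_text gap, "?"]

-- one step of unique_strings' loop over (seen, result)
def uniqueStep (st : PySem.Set String × List String) (value : String) : PySem.Set String × List String :=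
  let text := maybe_text value
  if text == "" || st.1.contains text then st
  else (st.1.add text, st.2 ++ [text])

def unique_strings (values : List String) : List String :=
  (values.foldl uniqueStep (PySem.Set.empty, [])).2

def build_open_questions (evidence_cards : List (List (String × List String))) : List String :=
  let questions := evidence_cards.foldl (fun acc card =>
    match (PySem.Dict.mk card).get? "gaps" with
    | none => acc   -- 'not isinstance(items, list)': in the typed port only a missing key
    | some items => items.foldl (fun acc2 item => acc2 ++ [gap_to_question (maybe_text item)]) acc) []
  PySem.List.slice (unique_strings questions) none (some 5)

-- ===== PORT B =====
-- inner 'for item in items' loop; the Bool flag is the early 'return result' at length 5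
def altInner (items : List String) (st : PySem.Set String × List String) :
    (PySem.Set String × List String) × Bool :=
  match items with
  | [] => (st, false)
  | item :: rest =>
    let text := maybe_text (gap_to_question (maybe_text item))
    if text == "" || st.1.contains text then altInner rest st
    else
      let result' := st.2 ++ [text]
      if result'.length = 5 then ((st.1.add text, result'), true)
      else altInner rest (st.1.add text, result')

def altOuter (cards : List (List (String × List String))) (st : PySem.Set String × List String) :
    List String :=
  match cards with
  | [] => st.2
  | card :: rest =>
    match (PySem.Dict.mk card).get? "gaps" with
    | none => altOuter rest st
    | some items =>
      let r := altInner items st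
      if r.2 then r.1.2 else altOuter rest r.1

def build_open_questions_alt (evidence_cards : List (List (String × List String))) : List String :=
  altOuter evidence_cards (PySem.Set.empty, [])

-- ===== PRECONDITION & SPEC =====
def Spec_build_open_questions (evidence_cards : List (List (String × List String))) (out : List String) : Prop := out = build_open_questions_alt evidence_cards
instance (evidence_cards : List (List (String × List String))) (out : List String) : Decidable (Spec_build_open_questions evidence_cards out) := by unfold Spec_build_open_questions; infer_instance

-- ===== CLAIM (what is proved, stated in full; the proofs are below) =====
def Claim_equal_build_open_questions : Prop := ∀ (evidence_cards : List (List (String × List String))), Dom_build_open_questions evidence_cards → Spec_build_open_questions evidence_cards (build_open_questions evidence_cards)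

-- ===== LEMMAS AND PROOFS =====

-- the questions a single card contributes
def cardQuestions (card : List (String × List String)) : List String :=
  match (PySem.Dict.mk card).get? "gaps" with
  | none => []
  | some items => items.map (fun item => gap_to_question (maybe_text item))

-- unique_strings' fold only appends to the result component
theorem uniqueFold_prefix (vals : List String) (st : PySem.Set String × List String) :
    ∃ t, (vals.foldl uniqueStep st).2 = st.2 ++ t := by
  induction vals generalizing st with
  | nil => exact ⟨[], by simp⟩
  | cons v rest ih =>
    obtain ⟨t, ht⟩ := ih (uniqueStep st v)
    have hs : ∃ s0, (uniqueStep st v).2 = st.2 ++ s0 := by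
      by_cases h : (maybe_text v == "" || st.1.contains (maybe_text v)) = true
      · exact ⟨[], by simp only [uniqueStep]; rw [if_pos h, List.append_nil]⟩
      · exact ⟨[maybe_text v], by simp only [uniqueStep]; rw [if_neg h]⟩
    obtain ⟨s0, hs0⟩ := hs
    refine ⟨s0 ++ t, ?_⟩
    rw [List.foldl_cons, ht, hs0, List.append_assoc]

-- A's questions foldl is flatMap of cardQuestions
theorem questions_eq (cards : List (List (String × List String))) (acc : List String) :
    cards.foldl (fun acc card =>
      match (PySem.Dict.mk card).get? "gaps" with
      | none => acc
      | some items => items.foldl (fun acc2 item => acc2 ++ [gap_to_question (maybe_text item)]) acc) acc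
    = acc ++ cards.flatMap cardQuestions := by
  induction cards generalizing acc with
  | nil => simp
  | cons card rest ih =>
    simp only [List.foldl_cons, List.flatMap_cons]
    cases h : (PySem.Dict.mk card).get? "gaps" with
    | none =>
      have hc : cardQuestions card = [] := by unfold cardQuestions; rw [h]
      simp only [h]
      rw [ih, hc, List.nil_append]
    | some items =>
      have hc : cardQuestions card = items.map (fun item => gap_to_question (maybe_text item)) := by
        unfold cardQuestions; rw [h]
      simp only [h]
      rw [PySem.List.foldl_append_singleton_eq_map, ih, hc, List.append_assoc]

-- the fused inner loop against unique_strings' fold on the mapped items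
theorem inner_eq (items : List String) (st : PySem.Set String × List String)
    (hlen : st.2.length < 5) :
    (((items.map (fun item => gap_to_question (maybe_text item))).foldl uniqueStep st).2.length < 5 ∧
       altInner items st = ((items.map (fun item => gap_to_question (maybe_text item))).foldl uniqueStep st, false))
    ∨ (5 ≤ ((items.map (fun item => gap_to_question (maybe_text item))).foldl uniqueStep st).2.length ∧
       (altInner items st).2 = true ∧
       (altInner items st).1.2 = ((items.map (fun item => gap_to_question (maybe_text item))).foldl uniqueStep st).2.take 5) := by
  induction items generalizing st with
  | nil => exact Or.inl ⟨hlen, rfl⟩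
  | cons item rest ih =>
    simp only [List.map_cons, List.foldl_cons, altInner]
    by_cases h : (maybe_text (gap_to_question (maybe_text item)) == ""
        || st.1.contains (maybe_text (gap_to_question (maybe_text item)))) = true
    · have hstep : uniqueStep st (gap_to_question (maybe_text item)) = st := by
        simp only [uniqueStep]; rw [if_pos h]
      rw [hstep, if_pos h]
      exact ih st hlen
    · have hstep : uniqueStep st (gap_to_question (maybe_text item))
          = (st.1.add (maybe_text (gap_to_question (maybe_text item))),
             st.2 ++ [maybe_text (gap_to_question (maybe_text item))]) := by
        simp only [uniqueStep]; rw [if_neg h]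
      rw [hstep, if_neg h]
      by_cases h5 : (st.2 ++ [maybe_text (gap_to_question (maybe_text item))]).length = 5
      · rw [if_pos h5]
        obtain ⟨t, ht⟩ := uniqueFold_prefix (rest.map (fun item => gap_to_question (maybe_text item)))
          (st.1.add (maybe_text (gap_to_question (maybe_text item))),
           st.2 ++ [maybe_text (gap_to_question (maybe_text item))])
        have ht' : ((rest.map (fun item => gap_to_question (maybe_text item))).foldl uniqueStep
            (st.1.add (maybe_text (gap_to_question (maybe_text item))),
             st.2 ++ [maybe_text (gap_to_question (maybe_text item))])).2
            = (st.2 ++ [maybe_text (gap_to_question (maybe_text item))]) ++ t := ht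
        refine Or.inr ⟨?_, rfl, ?_⟩
        · rw [ht', List.length_append, h5]; omega
        · rw [ht', List.take_append_of_le_length (le_of_eq h5.symm), List.take_of_length_le h5.le]
      · rw [if_neg h5]
        have hlen' : (st.2 ++ [maybe_text (gap_to_question (maybe_text item))]).length < 5 := by
          simp only [List.length_append, List.length_cons, List.length_nil] at h5 ⊢
          omega
        exact ih _ hlen'

-- the fused outer loop equals take 5 of unique_strings' fold over all remaining questions
theorem outer_eq (cards : List (List (String × List String))) (st : PySem.Set String × List String)
    (hlen : st.2.length < 5) :
    altOuter cards st = ((cards.flatMap cardQuestions).foldl uniqueStep st).2.take 5 := by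
  induction cards generalizing st with
  | nil =>
    simp only [altOuter, List.flatMap_nil, List.foldl_nil]
    exact (List.take_of_length_le (by omega)).symm
  | cons card rest ih =>
    simp only [altOuter, List.flatMap_cons, List.foldl_append]
    cases h : (PySem.Dict.mk card).get? "gaps" with
    | none =>
      have hc : cardQuestions card = [] := by unfold cardQuestions; rw [h]
      simp only [h, hc, List.foldl_nil]
      exact ih st hlen
    | some items =>
      have hc : cardQuestions card = items.map (fun item => gap_to_question (maybe_text item)) := by
        unfold cardQuestions; rw [h]
      simp only [h, hc]
      rcases inner_eq items st hlen with ⟨hl, heq⟩ | ⟨hl, hstop, hres⟩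
      · simp only [heq, Bool.false_eq_true, if_false]
        exact ih _ hl
      · rw [if_pos hstop, hres]
        obtain ⟨t, ht⟩ := uniqueFold_prefix (rest.flatMap cardQuestions)
          ((items.map (fun item => gap_to_question (maybe_text item))).foldl uniqueStep st)
        rw [ht, List.take_append_of_le_length hl]

-- ===== VERDICT (by name: the statement is the Claim_ definition above) =====
theorem build_open_questions_spec : Claim_equal_build_open_questions := by
  intro cards _
  show build_open_questions cards = build_open_questions_alt cards
  simp only [build_open_questions, build_open_questions_alt, unique_strings]
  rw [questions_eq, List.nil_append, outer_eq cards (PySem.Set.empty, []) (by simp)]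
  exact_mod_cast PySem.List.slice_to_natCast _ 5
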